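-- pv_equiv track=rewrite | github.com/mpulidobe/proyecto_finalFundamentosProgramacion | primer_tools.py | limpiar_degenerados
-- ===== SOURCE A (Python) =====
-- def limpiar_degenerados(secuencia):
--     '''Convierte todas las bases en una secuencia en mayusculas
--     Recorre la secuencia, base por base y si coindice con algun elemento del conjunto validos,
--     lo agrega a una lista vacía llamada secuencia_limpia, si no, lo reemplaza por 'N'
--     finalmente, retorna la secuencia_limpia convertida en un string'''
--     validos = set('ACGTN')
--     secuencia_limpia = []
--     secuencia = secuencia.upper()
--     for base in secuencia:
--         if base in validos:
--             secuencia_limpia.append(base)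
--         else:
--             secuencia_limpia.append('N')
--     secuencia_final = "".join(secuencia_limpia)
--     return secuencia_final
-- ===== SOURCE B (Python) =====
-- import re
--
-- _NON_ACGTN = re.compile(r'[^ACGTN]')
--
-- def limpiar_degenerados(secuencia):
--     return _NON_ACGTN.sub('N', secuencia.upper())
-- ===== Notes on version B (the rewrite author's own statement) =====
-- stated objective: idiomatic
-- what changed: Replaces the explicit per-character loop with set membership, list accumulation and join by a single precompiled regex substitution of the complement class [^ACGTN] applied to the uppercased string.
import Mathlib
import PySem

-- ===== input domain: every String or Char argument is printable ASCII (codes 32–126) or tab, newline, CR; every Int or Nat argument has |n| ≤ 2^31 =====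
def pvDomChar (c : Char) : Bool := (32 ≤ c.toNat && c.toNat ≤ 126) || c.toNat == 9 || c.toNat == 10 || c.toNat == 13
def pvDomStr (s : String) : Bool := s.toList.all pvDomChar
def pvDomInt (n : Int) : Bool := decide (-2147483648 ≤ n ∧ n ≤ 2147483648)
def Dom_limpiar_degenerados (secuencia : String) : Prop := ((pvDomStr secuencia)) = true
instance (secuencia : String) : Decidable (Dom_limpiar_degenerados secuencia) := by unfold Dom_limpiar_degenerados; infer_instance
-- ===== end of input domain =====

-- B replaces A's per-character loop/accumulate/join by one regex substitution of the
-- complement class [^ACGTN] on the uppercased string (idiomatic; same O(n) cost).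

-- ===== PORT A =====
-- literal transliteration: build validos as a set, upper, loop appending base or 'N', join
def limpiar_degenerados (secuencia : String) : String :=
  let validos : PySem.Set Char := PySem.Set.ofList "ACGTN".toList
  let secuencia := PySem.Str.upper secuencia
  let secuencia_limpia : List Char :=
    secuencia.toList.foldl
      (fun acc base => if validos.contains base then acc ++ [base] else acc ++ ['N']) []
  String.mk (PySem.Chars.join [] (secuencia_limpia.map (fun c => [c])))

-- ===== PORT B =====
-- re.sub(r'[^ACGTN]', 'N', secuencia.upper()): the single-char complement-class
-- substitution is exactly a character map over the uppercased string (exact on Dom).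
def limpiar_degenerados_alt (secuencia : String) : String :=
  String.mk ((PySem.Str.upper secuencia).toList.map
    (fun c => if ¬ (c ∈ ['A', 'C', 'G', 'T', 'N']) then 'N' else c))

-- ===== PRECONDITION & SPEC =====
def Spec_limpiar_degenerados (secuencia : String) (out : String) : Prop := out = limpiar_degenerados_alt secuencia
instance (secuencia : String) (out : String) : Decidable (Spec_limpiar_degenerados secuencia out) := by unfold Spec_limpiar_degenerados; infer_instance

-- ===== CLAIM (what is proved, stated in full; the proofs are below) =====
def Claim_equal_limpiar_degenerados : Prop := ∀ (secuencia : String), Dom_limpiar_degenerados secuencia → Spec_limpiar_degenerados secuencia (limpiar_degenerados secuencia)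

-- ===== LEMMAS AND PROOFS =====

theorem limpiar_step (acc : List Char) (validos : PySem.Set Char) (base : Char) :
    (if validos.contains base then acc ++ [base] else acc ++ ['N'])
      = acc ++ [if validos.contains base then base else 'N'] := by
  split_ifs <;> rfl

theorem limpiar_char (c : Char) :
    (if (PySem.Set.ofList "ACGTN".toList).contains c then c else 'N')
      = (if ¬ (c ∈ ['A', 'C', 'G', 'T', 'N']) then 'N' else c) := by
  by_cases h : c ∈ ['A', 'C', 'G', 'T', 'N'] <;>
    simp [PySem.Set.contains_eq_listContains, PySem.Set.mem_ofList, h]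

-- ===== VERDICT (by name: the statement is the Claim_ definition above) =====
theorem limpiar_degenerados_spec : Claim_equal_limpiar_degenerados := by
  intro s _
  unfold Spec_limpiar_degenerados limpiar_degenerados limpiar_degenerados_alt
  simp only [limpiar_step, PySem.List.foldl_append_singleton_eq_map, List.nil_append,
    PySem.Chars.join_nil_singletons]
  congr 1
  exact List.map_congr_left (fun c _ => limpiar_char c)
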